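-- pv_equiv track=rewrite | github.com/saytakov/CodeRun | easy/57/main.py | degree_genom_proxity
-- ===== SOURCE A (Python) =====
-- def degree_genom_proxity(genom1, genom2):
--     result = 0
--     genoms2 = set()
--     for i in range(len(genom2) - 1):
--         genoms2.add(genom2[i] + genom2[i+1])
--     for i in range(len(genom1) - 1):
--         if (genom1[i] + genom1[i+1]) in genoms2:
--             result += 1
--     return result
-- ===== SOURCE B (Python) =====
-- def degree_genom_proxity(genom1, genom2):
--     # tabulate genom1's adjacent pairs, then sum multiplicities over genom2's distinct pairs
--     counter = {}
--     for i in range(len(genom1) - 1):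
--         p = genom1[i] + genom1[i+1]
--         counter[p] = counter.get(p, 0) + 1
--     distinct2 = set()
--     for i in range(len(genom2) - 1):
--         distinct2.add(genom2[i] + genom2[i+1])
--     return sum(counter.get(p, 0) for p in distinct2)
-- ===== Notes on version B (the rewrite author's own statement) =====
-- stated objective: alternative
-- what changed: Swaps which sequence is indexed vs scanned: B tabulates genom1's adjacent pairs in a frequency dict and sums the multiplicities over genom2's distinct pairs, instead of testing each genom1 pair against a genom2 set.
import Mathlib
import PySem

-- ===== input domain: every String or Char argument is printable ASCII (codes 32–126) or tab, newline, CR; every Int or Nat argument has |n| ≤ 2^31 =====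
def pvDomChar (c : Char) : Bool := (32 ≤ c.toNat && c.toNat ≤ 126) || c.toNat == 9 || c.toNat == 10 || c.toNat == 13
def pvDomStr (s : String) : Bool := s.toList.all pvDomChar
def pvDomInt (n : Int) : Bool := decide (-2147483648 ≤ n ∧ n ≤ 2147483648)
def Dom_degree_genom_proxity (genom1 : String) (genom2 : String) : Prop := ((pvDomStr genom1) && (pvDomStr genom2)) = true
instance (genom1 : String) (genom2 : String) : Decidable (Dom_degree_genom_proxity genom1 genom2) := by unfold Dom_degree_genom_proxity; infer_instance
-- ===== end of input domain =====

-- B tabulates genom1's adjacent pairs in a frequency dict and sums multiplicities over genom2's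
-- distinct pairs, instead of A's membership test of each genom1 pair against a genom2 set.

-- ===== PORT A =====
-- adjacent two-character substrings s[i]+s[i+1] for i in range(len(s)-1), in order;
-- exact for the Python index loop since every access there is in range.
def pvAdjPairs : List Char → List String
  | a :: b :: t => String.mk [a, b] :: pvAdjPairs (b :: t)
  | _ => []

def degree_genom_proxity (genom1 : String) (genom2 : String) : Int :=
  let genoms2 : PySem.Set String := PySem.Set.ofList (pvAdjPairs genom2.toList)
  (pvAdjPairs genom1.toList).foldl
    (fun result p => if genoms2.contains p then result + 1 else result) 0

-- ===== PORT B =====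
def degree_genom_proxity_alt (genom1 : String) (genom2 : String) : Int :=
  let counter : PySem.Dict String Int :=
    (pvAdjPairs genom1.toList).foldl (fun d p => d.insert p (d.getD p 0 + 1)) PySem.Dict.empty
  let distinct2 : PySem.Set String := PySem.Set.ofList (pvAdjPairs genom2.toList)
  distinct2.foldl (fun acc p => acc + counter.getD p 0) 0

-- ===== PRECONDITION & SPEC =====
def Spec_degree_genom_proxity (genom1 : String) (genom2 : String) (out : Int) : Prop := out = degree_genom_proxity_alt genom1 genom2
instance (genom1 : String) (genom2 : String) (out : Int) : Decidable (Spec_degree_genom_proxity genom1 genom2 out) := by unfold Spec_degree_genom_proxity; infer_instance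

-- ===== CLAIM (what is proved, stated in full; the proofs are below) =====
def Claim_equal_degree_genom_proxity : Prop := ∀ (genom1 : String) (genom2 : String), Dom_degree_genom_proxity genom1 genom2 → Spec_degree_genom_proxity genom1 genom2 (degree_genom_proxity genom1 genom2)

-- ===== LEMMAS AND PROOFS =====

-- A's counting loop is the countP of set-membership over genom1's pairs
theorem pvFoldIf (D : List String) (xs : List String) (a : Int) :
    xs.foldl (fun r p => if p ∈ D then r + 1 else r) a
      = a + (xs.countP (fun p => decide (p ∈ D)) : Int) := by
  induction xs generalizing a with
  | nil => simp
  | cons x xs ih =>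
    simp only [List.foldl_cons, List.countP_cons, ih]
    by_cases h : x ∈ D <;> simp [h] <;> omega

theorem pvCountPCons (xs : List String) (d : String) (D : List String) (h : d ∉ D) :
    xs.countP (fun p => decide (p ∈ d :: D))
      = xs.count d + xs.countP (fun p => decide (p ∈ D)) := by
  have hpred : ∀ p : String, (decide (p ∈ d :: D)) = (decide (p = d) || decide (p ∈ D)) :=
    fun p => by simp [List.mem_cons]
  induction xs with
  | nil => simp
  | cons x xs ih =>
    simp only [List.countP_cons, List.count_cons, hpred, beq_iff_eq] at ih ⊢
    by_cases hx : x = d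
    · subst hx
      simp [h] at *
      omega
    · by_cases hD : x ∈ D <;> simp [hx, hD, ih] <;> omega

-- B's summation loop over a duplicate-free list equals A's countP
theorem pvFoldSum (xs : List String) (D : List String) (hD : D.Nodup) (a : Int) :
    D.foldl (fun acc p => acc + (xs.count p : Int)) a
      = a + (xs.countP (fun p => decide (p ∈ D)) : Int) := by
  induction D generalizing a with
  | nil => simp
  | cons d D ih =>
    rcases List.nodup_cons.mp hD with ⟨hd, hD'⟩
    simp only [List.foldl_cons, ih hD', pvCountPCons xs d D hd]
    push_cast
    ring
-- ===== VERDICT (by name: the statement is the Claim_ definition above) =====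
theorem degree_genom_proxity_spec : Claim_equal_degree_genom_proxity := by
  intro genom1 genom2 _
  unfold Spec_degree_genom_proxity degree_genom_proxity degree_genom_proxity_alt
  simp only [PySem.Dict.foldl_insert_getD_add_one_eq_counter, PySem.Dict.getD_counter]
  have hc : ∀ (l : List String) (x : String), (PySem.Set.contains l x) = decide (x ∈ l) := by
    intro l x; simp [PySem.Set.contains_eq_listContains]
  simp only [hc, decide_eq_true_eq]
  rw [pvFoldIf, pvFoldSum _ _ (PySem.Set.nodup_ofList _)]
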